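-- pv_equiv track=rewrite | github.com/Birkagal/AoC-2020 | src/4.py | partOne
-- ===== SOURCE A (Python) =====
-- def partOne(content):
--     credentials = []
--     single_credential = ""
--     valid_passports = 0
--     for line in content:
--         if line:
--             single_credential += line + " "
--         else:
--             credintial_dict = dict(
--                 map(lambda x: x.split(':'), single_credential.split()))
--             credentials.append(credintial_dict)
--             single_credential = ""
--     credintial_dict = dict(
--         map(lambda x: x.split(':'), single_credential.split()))
--     credentials.append(credintial_dict)
--     for data in credentials:
--         if len(data.keys()) == 8:
--             valid_passports += 1
--         elif len(data.keys()) == 7: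
--             if "cid" not in data:
--                 valid_passports += 1
--     return valid_passports
-- ===== SOURCE B (Python) =====
-- def partOne(content):
--     # Streaming rewrite: no string accumulation, no credentials list, no dicts -
--     # keep one running set of the current record's field keys and score each
--     # record (on its blank-line flush and at the end) as we go.
--     def valid(keys):
--         return len(keys) == 8 or (len(keys) == 7 and "cid" not in keys)
--
--     total = 0
--     keys = set()
--     for line in content:
--         if line:
--             for tok in line.split():
--                 k, _ = tok.split(':')
--                 keys.add(k)
--         else:
--             if valid(keys):
--                 total += 1
--             keys = set()
--     if valid(keys):
--         total += 1
--     return total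
-- ===== Notes on version B (the rewrite author's own statement) =====
-- stated objective: simpler
-- what changed: B streams: instead of accumulating a growing string per record, re-splitting it, building a dict per record into a list and then counting in a second loop, B keeps one running set of the current record's field keys and adds 1 to the count at each record boundary, so the string concatenation, the dicts and the second pass disappear.
import Mathlib
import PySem

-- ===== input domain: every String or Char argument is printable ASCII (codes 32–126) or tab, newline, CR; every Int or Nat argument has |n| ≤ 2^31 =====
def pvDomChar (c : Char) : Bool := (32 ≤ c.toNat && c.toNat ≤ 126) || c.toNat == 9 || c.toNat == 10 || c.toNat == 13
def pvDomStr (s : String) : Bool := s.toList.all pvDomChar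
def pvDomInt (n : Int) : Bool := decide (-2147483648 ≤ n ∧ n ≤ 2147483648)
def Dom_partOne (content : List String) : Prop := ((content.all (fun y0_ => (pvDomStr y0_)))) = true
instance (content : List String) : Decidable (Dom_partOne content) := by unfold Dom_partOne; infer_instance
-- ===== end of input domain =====

-- B streams one running set of field keys per record instead of accumulating a string,
-- building a dict per record into a list and counting in a second pass (objective: simpler).


-- ===== PORT A =====
-- dict(map(lambda x: x.split(':'), tokens)): Python raises ValueError when some token
-- does not split into exactly two parts on ':'; those inputs are excluded by Pre_ below
-- (the catch-all match arm is never reached inside Pre_).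
def pvDictOfTokens (tokens : List (List Char)) : PySem.Dict (List Char) (List Char) :=
  tokens.foldl (fun d t =>
    match PySem.Chars.splitOn t [':'] with
    | [k, v] => d.insert k v
    | _ => d) PySem.Dict.empty

-- body of A's second loop ('for data in credentials: …')
def pvStepA (v : Int) (d : PySem.Dict (List Char) (List Char)) : Int :=
  if d.size = 8 then v + 1
  else if d.size = 7 then (if d.contains ['c', 'i', 'd'] = false then v + 1 else v)
  else v

def partOne (content : List String) : Int :=
  let st := content.foldl
    (fun (st : List (PySem.Dict (List Char) (List Char)) × List Char) line =>
      if line.toList ≠ [] then (st.1, st.2 ++ line.toList ++ [' '])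
      else (st.1 ++ [pvDictOfTokens (PySem.Chars.split₀ st.2)], []))
    ([], [])
  (st.1 ++ [pvDictOfTokens (PySem.Chars.split₀ st.2)]).foldl pvStepA 0

-- ===== PORT B =====
def pvValid (keys : PySem.Set (List Char)) : Bool :=
  decide (PySem.Set.len keys = 8) ||
    (decide (PySem.Set.len keys = 7) && !(PySem.Set.contains keys ['c', 'i', 'd']))

def partOne_alt (content : List String) : Int :=
  let st := content.foldl
    (fun (st : Int × PySem.Set (List Char)) line =>
      if line.toList ≠ [] then
        (st.1, (PySem.Chars.split₀ line.toList).foldl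
                 (fun ks t =>
                   -- 'k, _ = tok.split(':')': raises ValueError unless exactly two
                   -- parts; those inputs are excluded by Pre_ (catch-all never reached)
                   match PySem.Chars.splitOn t [':'] with
                   | [k, _v] => PySem.Set.add ks k
                   | _ => ks) st.2)
      else
        ((if pvValid st.2 then st.1 + 1 else st.1), PySem.Set.empty))
    (0, PySem.Set.empty)
  if pvValid st.2 then st.1 + 1 else st.1

-- ===== PRECONDITION & SPEC =====
-- Pre_ excludes exactly the inputs on which A raises ValueError: some whitespace-separated
-- token of the input does not split into exactly two parts on ':'.
def Pre_partOne (content : List String) : Prop :=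
  ∀ line ∈ content, ∀ t ∈ PySem.Chars.split₀ line.toList,
    (PySem.Chars.splitOn t [':']).length = 2

instance (content : List String) : Decidable (Pre_partOne content) := by
  unfold Pre_partOne; infer_instance

def pvWitness_partOne : List String := ["a:1 b:2", "", "cid:5"]

def Spec_partOne (content : List String) (out : Int) : Prop := out = partOne_alt content
instance (content : List String) (out : Int) : Decidable (Spec_partOne content out) := by
  unfold Spec_partOne; infer_instance

-- ===== CLAIM (what is proved, stated in full; the proofs are below) =====
def Claim_equal_partOne : Prop :=
  ∀ (content : List String), Dom_partOne content → Pre_partOne content →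
    Spec_partOne content (partOne content)

-- ===== LEMMAS AND PROOFS =====

-- proof-only abbreviation: the key part of a well-formed token
def pvKey (t : List Char) : List Char := (PySem.Chars.splitOn t [':']).headD []

theorem pv_go_acc (s : List Char) : ∀ (cur : List Char) (acc : List (List Char)),
    PySem.Chars.split₀.go s cur acc = acc.reverse ++ PySem.Chars.split₀.go s cur [] := by
  induction s with
  | nil => intro cur acc; by_cases h : cur.isEmpty <;> simp [PySem.Chars.split₀.go, h]
  | cons c rest ih =>
    intro cur acc
    by_cases hs : PySem.Chars.isspace c
    · by_cases hc : cur.isEmpty <;>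
        simp [PySem.Chars.split₀.go, hs, hc, ih [] acc, ih [] (cur.reverse :: acc),
              ih [] [cur.reverse]]
    · simp [PySem.Chars.split₀.go, hs, ih (c :: cur) acc]

theorem pv_go_split (b : List Char) (a : List Char) :
    ∀ (cur : List Char) (acc : List (List Char)),
    PySem.Chars.split₀.go (a ++ ' ' :: b) cur acc =
      PySem.Chars.split₀.go a cur acc ++ PySem.Chars.split₀ b := by
  induction a with
  | nil =>
    intro cur acc
    have hsp : PySem.Chars.isspace ' ' = true := by decide
    by_cases hc : cur.isEmpty <;>
      simp [PySem.Chars.split₀.go, PySem.Chars.split₀, hsp, hc,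
            pv_go_acc b [] acc, pv_go_acc b [] (cur.reverse :: acc)]
  | cons c rest ih =>
    intro cur acc
    by_cases hs : PySem.Chars.isspace c
    · by_cases hc : cur.isEmpty <;> simp [PySem.Chars.split₀.go, hs, hc, ih]
    · simp [PySem.Chars.split₀.go, hs, ih]

theorem pv_split₀_append_space (a b : List Char) :
    PySem.Chars.split₀ (a ++ ' ' :: b) =
      PySem.Chars.split₀ a ++ PySem.Chars.split₀ b := by
  simpa [PySem.Chars.split₀] using pv_go_split b a [] []

theorem pv_split₀_snoc_space (a : List Char) :
    PySem.Chars.split₀ (a ++ [' ']) = PySem.Chars.split₀ a := by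
  simpa [PySem.Chars.split₀, PySem.Chars.split₀.go] using pv_split₀_append_space a []

theorem pv_dict_keys (ts : List (List Char))
    (h : ∀ t ∈ ts, (PySem.Chars.splitOn t [':']).length = 2) :
    (pvDictOfTokens ts).keys = PySem.Set.ofList (ts.map pvKey) := by
  have hcongr : ts.foldl (fun d t =>
        match PySem.Chars.splitOn t [':'] with
        | [k, v] => d.insert k v
        | _ => d) PySem.Dict.empty
      = ts.foldl (fun d t =>
          d.insert (pvKey t) ((PySem.Chars.splitOn t [':']).getD 1 []))
          PySem.Dict.empty := by
    apply PySem.List.foldl_congr_mem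
    intro acc t ht
    have h2 := h t ht
    match hsp : PySem.Chars.splitOn t [':'] with
    | [k, v] => simp [pvKey, hsp]
    | [] => simp [hsp] at h2
    | [k] => simp [hsp] at h2
    | k :: v :: w :: r => simp [hsp] at h2
  unfold pvDictOfTokens
  rw [hcongr,
      PySem.Dict.keys_foldl_insert_key ts pvKey
        (fun _ t => (PySem.Chars.splitOn t [':']).getD 1 []) PySem.Dict.empty]
  simp [PySem.Dict.keys_empty, PySem.Set.update, PySem.Set.ofList_eq_foldl]

theorem pv_score (ts : List (List Char)) (v : Int)
    (h : ∀ t ∈ ts, (PySem.Chars.splitOn t [':']).length = 2) :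
    pvStepA v (pvDictOfTokens ts) =
      if pvValid (PySem.Set.ofList (ts.map pvKey)) then v + 1 else v := by
  have hkeys := pv_dict_keys ts h
  have hsize : (pvDictOfTokens ts).size = (PySem.Set.ofList (ts.map pvKey)).length := by
    rw [← hkeys]; simp [PySem.Dict.size, PySem.Dict.keys]
  have hcont : (pvDictOfTokens ts).contains ['c', 'i', 'd'] =
      PySem.Set.contains (PySem.Set.ofList (ts.map pvKey)) ['c', 'i', 'd'] := by
    rw [← hkeys]
    simp [PySem.Dict.contains_eq_decide_mem_keys, PySem.Set.contains]
  unfold pvStepA pvValid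
  rw [hsize, hcont]
  simp only [PySem.Set.len]
  split_ifs <;> simp_all <;> omega

theorem pv_set_step (ts1 ts2 : List (List Char))
    (h : ∀ t ∈ ts2, (PySem.Chars.splitOn t [':']).length = 2) :
    ts2.foldl (fun ks t =>
        match PySem.Chars.splitOn t [':'] with
        | [k, _v] => PySem.Set.add ks k
        | _ => ks)
        (PySem.Set.ofList (ts1.map pvKey)) =
      PySem.Set.ofList ((ts1 ++ ts2).map pvKey) := by
  have hcongr : ts2.foldl (fun ks t =>
        match PySem.Chars.splitOn t [':'] with
        | [k, _v] => PySem.Set.add ks k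
        | _ => ks) (PySem.Set.ofList (ts1.map pvKey))
      = ts2.foldl (fun ks t => PySem.Set.add ks (pvKey t))
          (PySem.Set.ofList (ts1.map pvKey)) := by
    apply PySem.List.foldl_congr_mem
    intro acc t ht
    have h2 := h t ht
    match hsp : PySem.Chars.splitOn t [':'] with
    | [k, v] => simp [pvKey, hsp]
    | [] => simp [hsp] at h2
    | [k] => simp [hsp] at h2
    | k :: v :: w :: r => simp [hsp] at h2
  rw [hcongr]
  simp [PySem.Set.ofList_eq_foldl, List.map_append, List.foldl_append, List.foldl_map]

theorem pv_main (content : List String)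
    (hpre : ∀ line ∈ content, ∀ t ∈ PySem.Chars.split₀ line.toList,
      (PySem.Chars.splitOn t [':']).length = 2) :
    ∀ (creds : List (PySem.Dict (List Char) (List Char))) (single : List Char)
      (total : Int) (keys : PySem.Set (List Char)),
      total = creds.foldl pvStepA 0 →
      keys = PySem.Set.ofList ((PySem.Chars.split₀ single).map pvKey) →
      (single = [] ∨ ∃ s', single = s' ++ [' ']) →
      (∀ t ∈ PySem.Chars.split₀ single, (PySem.Chars.splitOn t [':']).length = 2) →
      (let stA := content.foldl
          (fun (st : List (PySem.Dict (List Char) (List Char)) × List Char) line =>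
            if line.toList ≠ [] then (st.1, st.2 ++ line.toList ++ [' '])
            else (st.1 ++ [pvDictOfTokens (PySem.Chars.split₀ st.2)], []))
          (creds, single)
       let stB := content.foldl
          (fun (st : Int × PySem.Set (List Char)) line =>
            if line.toList ≠ [] then
              (st.1, (PySem.Chars.split₀ line.toList).foldl
                       (fun ks t =>
                         match PySem.Chars.splitOn t [':'] with
                         | [k, _v] => PySem.Set.add ks k
                         | _ => ks) st.2)
            else
              ((if pvValid st.2 then st.1 + 1 else st.1), PySem.Set.empty))
          (total, keys)
       (stA.1 ++ [pvDictOfTokens (PySem.Chars.split₀ stA.2)]).foldl pvStepA 0 =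
         if pvValid stB.2 then stB.1 + 1 else stB.1) := by
  induction content with
  | nil =>
    intro creds single total keys h1 h2 _h3 h4
    simp only [List.foldl_nil, List.foldl_append, List.foldl_cons]
    rw [← h1, pv_score _ _ h4, ← h2]
  | cons line rest ih =>
    intro creds single total keys h1 h2 h3 h4
    have hline := hpre line (List.mem_cons_self ..)
    have hrest : ∀ l ∈ rest, ∀ t ∈ PySem.Chars.split₀ l.toList,
        (PySem.Chars.splitOn t [':']).length = 2 := by
      intro l hl; exact hpre l (List.mem_cons_of_mem _ hl)
    simp only [List.foldl_cons]
    by_cases hne : line.toList = []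
    · simp only [hne, ne_eq, not_true_eq_false, if_false]
      refine ih hrest _ _ _ _ ?_ ?_ (Or.inl rfl) ?_
      · rw [h1, List.foldl_append, List.foldl_cons, List.foldl_nil, ← h1,
            pv_score _ _ h4, ← h2]
      · simp [PySem.Set.empty, PySem.Chars.split₀, PySem.Chars.split₀.go,
              PySem.Set.ofList]
      · intro t ht; simp [PySem.Chars.split₀, PySem.Chars.split₀.go] at ht
    · simp only [hne, ne_eq, not_false_eq_true, if_true]
      have hsplit : PySem.Chars.split₀ (single ++ line.toList ++ [' ']) =
          PySem.Chars.split₀ single ++ PySem.Chars.split₀ line.toList := by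
        rcases h3 with h3 | ⟨s', rfl⟩
        · subst h3
          simpa using pv_split₀_snoc_space line.toList
        · have : s' ++ [' '] ++ line.toList ++ [' '] =
              s' ++ ' ' :: (line.toList ++ [' ']) := by simp
          rw [this, pv_split₀_append_space, pv_split₀_snoc_space,
              pv_split₀_append_space]
          simp [PySem.Chars.split₀, PySem.Chars.split₀.go]
      refine ih hrest _ _ _ _ h1 ?_ (Or.inr ⟨single ++ line.toList, by simp⟩) ?_
      · rw [h2, pv_set_step _ _ hline, hsplit]
      · rw [hsplit]
        intro t ht
        rcases List.mem_append.mp ht with h | h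
        · exact h4 t h
        · exact hline t h

-- ===== VERDICT (by name: the statement is the Claim_ definition above) =====
theorem partOne_spec : Claim_equal_partOne := by
  intro content _hdom hpre
  show partOne content = partOne_alt content
  unfold partOne partOne_alt
  have := pv_main content hpre [] [] 0 PySem.Set.empty rfl
    (by simp [PySem.Chars.split₀, PySem.Chars.split₀.go, PySem.Set.ofList, PySem.Set.empty])
    (Or.inl rfl)
    (by intro t ht; simp [PySem.Chars.split₀, PySem.Chars.split₀.go] at ht)
  simp only [] at this ⊢
  exact this
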